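-- pv_equiv track=rewrite | github.com/aviAVIRAL/2025- | Lec 2   BFS   DFS/L16.1  BFS .py | num_unique_islands
-- ===== SOURCE A (Python) =====
-- from collections import deque
--
-- def bfs(row, col, vis, grid, base_row, base_col, shape):
--     n, m = len(grid), len(grid[0])
--     vis[row][col] = 1
--     q = deque([(row, col)])
--     shape.append((0, 0))
--
--     delrow = [-1, 0, 1, 0]
--     delcol = [0, 1, 0, -1]
--
--     while q:
--         r, c = q.popleft()
--         for i in range(4):
--             nrow, ncol = r + delrow[i], c + delcol[i]
--             if 0 <= nrow < n and 0 <= ncol < m and grid[nrow][ncol] == '1' and not vis[nrow][ncol]: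
--                 vis[nrow][ncol] = 1
--                 q.append((nrow, ncol))
--                 shape.append((nrow - base_row, ncol - base_col))
--
-- def num_unique_islands(grid):
--     n, m = len(grid), len(grid[0])
--     vis = [[0] * m for _ in range(n)]
--     unique_islands = set()
--
--     for i in range(n):
--         for j in range(m):
--             if grid[i][j] == '1' and not vis[i][j]:
--                 shape = []
--                 bfs(i, j, vis, grid, i, j, shape)
--                 unique_islands.add(frozenset(shape))
--
--     return len(unique_islands)
-- ===== SOURCE B (Python) =====
-- def num_unique_islands(grid):
--     n, m = len(grid), len(grid[0])
--     seen = set()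
--     shapes = set()
--     for i in range(n):
--         for j in range(m):
--             if grid[i][j] == '1' and (i, j) not in seen:
--                 shape = set()
--                 stack = [(i, j)]
--                 while stack:
--                     r, c = stack.pop()
--                     if not (0 <= r < n and 0 <= c < m) or grid[r][c] != '1' or (r, c) in seen:
--                         continue
--                     seen.add((r, c))
--                     shape.add((r - i, c - j))
--                     stack.extend(((r - 1, c), (r + 1, c), (r, c + 1), (r, c - 1)))
--                 shapes.add(frozenset(shape))
--     return len(shapes)
-- ===== Notes on version B (the rewrite author's own statement) =====
-- stated objective: alternative
-- what changed: Replaces the BFS helper (deque, mark-and-record at enqueue time, vis matrix) with an inline stack-based flood fill that validates and marks cells at pop time, tracks visited cells in a set of coordinates instead of a matrix, and accumulates each shape directly as a set.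
import Mathlib
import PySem

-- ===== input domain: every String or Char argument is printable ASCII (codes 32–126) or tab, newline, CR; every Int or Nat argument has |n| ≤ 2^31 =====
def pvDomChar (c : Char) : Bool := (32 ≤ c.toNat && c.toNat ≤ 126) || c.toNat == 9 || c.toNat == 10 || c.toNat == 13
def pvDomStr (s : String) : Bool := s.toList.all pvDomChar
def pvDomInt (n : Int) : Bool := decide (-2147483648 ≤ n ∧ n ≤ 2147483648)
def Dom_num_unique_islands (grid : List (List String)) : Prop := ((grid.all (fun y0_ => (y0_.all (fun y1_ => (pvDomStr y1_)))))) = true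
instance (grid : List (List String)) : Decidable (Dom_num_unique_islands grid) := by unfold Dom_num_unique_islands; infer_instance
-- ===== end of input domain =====

-- B replaces A's BFS helper (deque, mark-at-enqueue, vis matrix) by an inline stack flood
-- fill that validates/marks at pop time, with a coordinate set instead of a vis matrix;
-- equal shape frozensets give the same count. Return value only (A mutates nothing observable).

-- ===== PORT A =====

-- shared: grid[r][c] (total form; guarded in range wherever its value matters)
def pvCell (grid : List (List String)) (r c : Int) : String :=
  PySem.List.pyGetD (PySem.List.pyGetD grid r []) c ""

-- frozenset of a list of int pairs, modelled canonically: the distinct elements in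
-- lexicographic order (frozenset equality = set equality, so both ports canonicalise)
def pvPairLe (p q : Int × Int) : Bool := p.1 < q.1 || (p.1 == q.1 && p.2 ≤ q.2)
def pvFrozen (shape : List (Int × Int)) : List (Int × Int) :=
  (PySem.List.dedup shape).mergeSort (fun p q => pvPairLe p q)

-- vis[r][c] (total form)
def pvVisAt (vis : List (List Int)) (r c : Int) : Int :=
  PySem.List.pyGetD (PySem.List.pyGetD vis r []) c 1

-- vis[r][c] = 1
def pvMark (vis : List (List Int)) (r c : Int) : List (List Int) :=
  PySem.List.pySetD vis r (PySem.List.pySetD (PySem.List.pyGetD vis r []) c 1)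

def pvDelrow : List Int := [-1, 0, 1, 0]
def pvDelcol : List Int := [0, 1, 0, -1]

-- the `while q:` loop of bfs; state (vis, q, shape); fuel only makes it total (lemma
-- pvBfsLoop_spec shows the given fuel is never exhausted)
def pvBfsLoop (grid : List (List String)) (base_row base_col : Int) :
    Nat → List (Int × Int) → List (List Int) → List (Int × Int) →
    List (List Int) × List (Int × Int)
  | 0, _, vis, shape => (vis, shape)
  | _ + 1, [], vis, shape => (vis, shape)
  | fuel + 1, (r, c) :: q, vis, shape =>
    let st := (List.range 4).foldl
      (fun (st : List (List Int) × List (Int × Int) × List (Int × Int)) i =>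
        let nrow := r + pvDelrow.getD i 0
        let ncol := c + pvDelcol.getD i 0
        if 0 ≤ nrow ∧ nrow < (grid.length : Int) ∧ 0 ≤ ncol ∧
            ncol < (((grid.headD []).length : Int)) ∧ pvCell grid nrow ncol = "1" ∧
            pvVisAt st.1 nrow ncol = 0 then
          (pvMark st.1 nrow ncol, st.2.1 ++ [(nrow, ncol)],
           st.2.2 ++ [(nrow - base_row, ncol - base_col)])
        else st)
      (vis, q, shape)
    pvBfsLoop grid base_row base_col fuel st.2.1 st.1 st.2.2

def pvBfs (grid : List (List String)) (row col : Int) (vis : List (List Int))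
    (base_row base_col : Int) (shape : List (Int × Int)) :
    List (List Int) × List (Int × Int) :=
  pvBfsLoop grid base_row base_col (grid.length * (grid.headD []).length + 1)
    [(row, col)] (pvMark vis row col) (shape ++ [(0, 0)])

def num_unique_islands (grid : List (List String)) : Int :=
  let n := grid.length
  let m := (grid.headD []).length
  let init : List (List Int) × PySem.Set (List (Int × Int)) :=
    (List.replicate n (List.replicate m 0), PySem.Set.empty)
  let st := (PySem.List.pyRange 0 (n : Int)).foldl (fun st i =>
    (PySem.List.pyRange 0 (m : Int)).foldl (fun st j =>
      if pvCell grid i j = "1" ∧ pvVisAt st.1 i j = 0 then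
        let r := pvBfs grid i j st.1 i j []
        (r.1, PySem.Set.add st.2 (pvFrozen r.2))
      else st) st) init
  PySem.Set.len st.2

-- ===== PORT B =====

-- the `while stack:` loop; pops from the end, validates and marks at pop time
def pvDfsLoop (grid : List (List String)) (bi bj : Int) :
    Nat → List (Int × Int) → PySem.Set (Int × Int) → PySem.Set (Int × Int) →
    PySem.Set (Int × Int) × PySem.Set (Int × Int)
  | 0, _, seen, shape => (seen, shape)
  | _ + 1, [], seen, shape => (seen, shape)
  | fuel + 1, p :: rest, seen, shape =>
    let rc := (p :: rest).getLast (by simp)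
    let stack' := (p :: rest).dropLast
    let r := rc.1
    let c := rc.2
    if (¬ (0 ≤ r ∧ r < (grid.length : Int) ∧ 0 ≤ c ∧ c < ((grid.headD []).length : Int))) ∨
        pvCell grid r c ≠ "1" ∨ PySem.Set.contains seen (r, c) = true then
      pvDfsLoop grid bi bj fuel stack' seen shape
    else
      pvDfsLoop grid bi bj fuel
        (stack' ++ [(r - 1, c), (r + 1, c), (r, c + 1), (r, c - 1)])
        (PySem.Set.add seen (r, c)) (PySem.Set.add shape (r - bi, c - bj))

def num_unique_islands_alt (grid : List (List String)) : Int :=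
  let n := grid.length
  let m := (grid.headD []).length
  let init : PySem.Set (Int × Int) × PySem.Set (List (Int × Int)) :=
    (PySem.Set.empty, PySem.Set.empty)
  let st := (PySem.List.pyRange 0 (n : Int)).foldl (fun st i =>
    (PySem.List.pyRange 0 (m : Int)).foldl (fun st j =>
      if pvCell grid i j = "1" ∧ ¬ PySem.Set.contains st.1 (i, j) = true then
        let r := pvDfsLoop grid i j (5 * (n * m) + 1) [(i, j)] st.1 PySem.Set.empty
        (r.1, PySem.Set.add st.2 (pvFrozen r.2))
      else st) st) init
  PySem.Set.len st.2

-- ===== PRECONDITION & SPEC =====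

-- Pre_ excludes exactly the grids on which Python A raises IndexError: the empty grid
-- (len(grid[0])) and grids where some row is shorter than row 0 (grid[i][j] for j < m).
def Pre_num_unique_islands (grid : List (List String)) : Prop :=
  grid ≠ [] ∧ ∀ row ∈ grid, (grid.headD []).length ≤ row.length
instance (grid : List (List String)) : Decidable (Pre_num_unique_islands grid) := by
  unfold Pre_num_unique_islands; infer_instance

def pvWitness_num_unique_islands : List (List String) :=
  [["1", "0"], ["0", "1"]]

def Spec_num_unique_islands (grid : List (List String)) (out : Int) : Prop :=
  out = num_unique_islands_alt grid
instance (grid : List (List String)) (out : Int) : Decidable (Spec_num_unique_islands grid out) := by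
  unfold Spec_num_unique_islands; infer_instance

-- ===== CLAIM (what is proved, stated in full; the proofs are below) =====
def Claim_equal_num_unique_islands : Prop := ∀ (grid : List (List String)), Dom_num_unique_islands grid → Pre_num_unique_islands grid → Spec_num_unique_islands grid (num_unique_islands grid)

-- ===== LEMMAS AND PROOFS =====

-- ---- basic geometry over a fixed grid ----

def pvInb (grid : List (List String)) (p : Int × Int) : Prop :=
  0 ≤ p.1 ∧ p.1 < (grid.length : Int) ∧ 0 ≤ p.2 ∧ p.2 < ((grid.headD []).length : Int)

def pvOne (grid : List (List String)) (p : Int × Int) : Prop := pvCell grid p.1 p.2 = "1"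

def pvAdj (p q : Int × Int) : Prop :=
  q = (p.1 - 1, p.2) ∨ q = (p.1 + 1, p.2) ∨ q = (p.1, p.2 + 1) ∨ q = (p.1, p.2 - 1)

def pvOkC (grid : List (List String)) (blocked : Int × Int → Prop) (p : Int × Int) : Prop :=
  pvInb grid p ∧ pvOne grid p ∧ ¬ blocked p

inductive pvReach (grid : List (List String)) (blocked : Int × Int → Prop) (s : Int × Int) :
    Int × Int → Prop
  | refl : pvReach grid blocked s s
  | step {p q : Int × Int} : pvReach grid blocked s p → pvAdj p q →
      pvOkC grid blocked q → pvReach grid blocked s q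

def pvRel (s p : Int × Int) : Int × Int := (p.1 - s.1, p.2 - s.2)

lemma pvRel_inj (s : Int × Int) {p q : Int × Int} (h : pvRel s p = pvRel s q) : p = q := by
  unfold pvRel at h
  have h1 := congrArg Prod.fst h
  have h2 := congrArg Prod.snd h
  simp at h1 h2
  exact Prod.ext_iff.2 ⟨by omega, by omega⟩

lemma pvReach_congr {grid : List (List String)} {b1 b2 : Int × Int → Prop} {s : Int × Int}
    (h : ∀ p, pvInb grid p → pvOne grid p → (b1 p ↔ b2 p)) :
    ∀ q, pvReach grid b1 s q → pvReach grid b2 s q := by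
  intro q hq
  induction hq with
  | refl => exact pvReach.refl
  | step hp hadj hok ih =>
    exact pvReach.step ih hadj ⟨hok.1, hok.2.1, fun hb => hok.2.2 ((h _ hok.1 hok.2.1).2 hb)⟩

-- ---- vis matrix lemmas ----

def pvDims (grid : List (List String)) (vis : List (List Int)) : Prop :=
  vis.length = grid.length ∧ ∀ row ∈ vis, row.length = (grid.headD []).length

lemma pvVisAt_eq_getD {vis : List (List Int)} {r c : Int} (hr : 0 ≤ r) (hc : 0 ≤ c) :
    pvVisAt vis r c = (vis.getD r.toNat []).getD c.toNat 1 := by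
  unfold pvVisAt
  rw [PySem.List.pyGetD_of_nonneg _ _ hr, PySem.List.pyGetD_of_nonneg _ _ hc]

lemma pvMark_dims {grid : List (List String)} {vis : List (List Int)} {r c : Int}
    (hd : pvDims grid vis) (hr : 0 ≤ r) (hrn : r < (grid.length : Int))
    (hc : 0 ≤ c) : pvDims grid (pvMark vis r c) := by
  obtain ⟨hlen, hrow⟩ := hd
  unfold pvMark
  rw [PySem.List.pySetD_of_nonneg _ _ hr, PySem.List.pySetD_of_nonneg _ _ hc,
    PySem.List.pyGetD_of_nonneg _ _ hr]
  constructor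
  · simpa using hlen
  · intro row hmem
    rcases List.mem_or_eq_of_mem_set hmem with h | h
    · exact hrow _ h
    · subst h
      have hrlt : r.toNat < vis.length := by omega
      have : vis.getD r.toNat [] = vis[r.toNat] := List.getD_eq_getElem vis [] hrlt
      rw [this]
      simpa using hrow _ (List.getElem_mem hrlt)

lemma pvVisAt_pvMark {grid : List (List String)} {vis : List (List Int)} {q p : Int × Int}
    (hd : pvDims grid vis) (hq : pvInb grid q) (hp : pvInb grid p) :
    pvVisAt (pvMark vis q.1 q.2) p.1 p.2 = if p = q then 1 else pvVisAt vis p.1 p.2 := by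
  obtain ⟨hlen, hrow⟩ := hd
  obtain ⟨hq1, hq2, hq3, hq4⟩ := hq
  obtain ⟨hp1, hp2, hp3, hp4⟩ := hp
  have hqr : q.1.toNat < vis.length := by omega
  have hrowlen : vis[q.1.toNat].length = (grid.headD []).length :=
    hrow _ (List.getElem_mem hqr)
  have hpr : p.1.toNat < vis.length := by omega
  unfold pvMark
  rw [PySem.List.pySetD_of_nonneg _ _ hq1, PySem.List.pySetD_of_nonneg _ _ hq3,
    PySem.List.pyGetD_of_nonneg _ _ hq1,
    pvVisAt_eq_getD hp1 hp3, pvVisAt_eq_getD hp1 hp3]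
  rw [List.getD_eq_getElem vis [] hqr]
  have hrowsel : (vis.set q.1.toNat (vis[q.1.toNat].set q.2.toNat 1)).getD p.1.toNat []
      = if q.1.toNat = p.1.toNat then vis[q.1.toNat].set q.2.toNat 1
        else vis.getD p.1.toNat [] := by
    rw [List.getD_eq_getElem?_getD, List.getElem?_set]
    by_cases h : q.1.toNat = p.1.toNat
    · rw [if_pos h, if_pos hqr, if_pos h]; rfl
    · rw [if_neg h, ← List.getD_eq_getElem?_getD, if_neg h]
  rw [hrowsel]
  by_cases hrr : q.1.toNat = p.1.toNat
  · rw [if_pos hrr]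
    rw [List.getD_eq_getElem?_getD, List.getElem?_set]
    by_cases hcc : q.2.toNat = p.2.toNat
    · have hpq : p = q := Prod.ext_iff.2 ⟨by omega, by omega⟩
      rw [if_pos hcc, if_pos hpq]
      have hqc : q.2.toNat < vis[q.1.toNat].length := by omega
      rw [if_pos hqc]
      simp
    · have hpq : ¬ p = q := by intro h; subst h; omega
      rw [if_neg hcc, if_neg hpq, ← List.getD_eq_getElem?_getD,
        List.getD_eq_getElem vis [] hpr]
      have : vis[q.1.toNat] = vis[p.1.toNat] := by congr 1
      rw [this]
  · have hpq : ¬ p = q := by intro h; subst h; omega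
    rw [if_neg hrr, if_neg hpq]

-- a Nodup list of in-bounds cells has at most n*m elements
lemma pvLen_le_box {grid : List (List String)} {l : List (Int × Int)} (hn : l.Nodup)
    (hin : ∀ p ∈ l, pvInb grid p) :
    l.length ≤ grid.length * (grid.headD []).length := by
  classical
  set f : Int × Int → Nat × Nat := fun p => (p.1.toNat, p.2.toNat) with hf
  have hmapnd : (l.map f).Nodup := by
    refine List.Nodup.map_on ?_ hn
    intro x hx y hy hxy
    obtain ⟨hx1, hx2, hx3, hx4⟩ := hin x hx
    obtain ⟨hy1, hy2, hy3, hy4⟩ := hin y hy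
    simp only [hf, Prod.mk.injEq] at hxy
    exact Prod.ext_iff.2 ⟨by omega, by omega⟩
  have hsub : ∀ x ∈ l.map f, x ∈ Finset.range grid.length ×ˢ Finset.range (grid.headD []).length := by
    intro x hx
    obtain ⟨p, hp, rfl⟩ := List.mem_map.1 hx
    have := hin p hp
    simp only [Finset.mem_product, Finset.mem_range, hf]
    obtain ⟨h1, h2, h3, h4⟩ := this
    omega
  have hcard : (l.map f).toFinset.card = (l.map f).length := List.toFinset_card_of_nodup hmapnd
  have hsub' : (l.map f).toFinset ⊆ Finset.range grid.length ×ˢ Finset.range (grid.headD []).length := by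
    intro x hx
    exact hsub x (List.mem_toFinset.1 hx)
  have := Finset.card_le_card hsub'
  simp only [Finset.card_product, Finset.card_range] at this
  have hlm : (l.map f).length = l.length := List.length_map ..
  omega

-- ---- frozen sets ----

lemma pvPairLe_trans (a b c : Int × Int) (hab : pvPairLe a b = true) (hbc : pvPairLe b c = true) :
    pvPairLe a c = true := by
  unfold pvPairLe at *
  simp only [Bool.or_eq_true, Bool.and_eq_true, decide_eq_true_eq, beq_iff_eq] at *
  omega

lemma pvPairLe_total (a b : Int × Int) : (pvPairLe a b || pvPairLe b a) = true := by
  unfold pvPairLe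
  simp only [Bool.or_eq_true, Bool.and_eq_true, decide_eq_true_eq, beq_iff_eq]
  omega

lemma pvPairLe_antisymm {a b : Int × Int} (hab : pvPairLe a b = true) (hba : pvPairLe b a = true) :
    a = b := by
  unfold pvPairLe at *
  simp only [Bool.or_eq_true, Bool.and_eq_true, decide_eq_true_eq, beq_iff_eq] at *
  exact Prod.ext_iff.2 ⟨by omega, by omega⟩

lemma pvFrozen_eq {l1 l2 : List (Int × Int)} (h1 : l1.Nodup) (h2 : l2.Nodup)
    (hm : ∀ x, x ∈ l1 ↔ x ∈ l2) : pvFrozen l1 = pvFrozen l2 := by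
  unfold pvFrozen
  rw [PySem.List.dedup_eq_ofList, PySem.List.dedup_eq_ofList,
    PySem.Set.ofList_eq_self_of_nodup _ h1, PySem.Set.ofList_eq_self_of_nodup _ h2]
  have hperm : l1.Perm l2 := by
    rw [List.perm_ext_iff_of_nodup h1 h2]
    exact hm
  have hs1 := List.pairwise_mergeSort (le := fun p q => pvPairLe p q)
    pvPairLe_trans pvPairLe_total l1
  have hs2 := List.pairwise_mergeSort (le := fun p q => pvPairLe p q)
    pvPairLe_trans pvPairLe_total l2
  refine List.Perm.eq_of_pairwise ?_ hs1 hs2 ?_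
  · intro a b _ _ hab hba
    exact pvPairLe_antisymm hab hba
  · exact ((l1.mergeSort_perm _).trans hperm).trans (l2.mergeSort_perm _).symm


-- ---- A side: BFS loop invariant ----

def pvBlockedA (vis0 : List (List Int)) (p : Int × Int) : Prop := pvVisAt vis0 p.1 p.2 ≠ 0

structure pvInvA (grid : List (List String)) (s : Int × Int) (vis0 : List (List Int))
    (shape0 : List (Int × Int)) (exempt q : List (Int × Int)) (vis : List (List Int))
    (shape lV : List (Int × Int)) : Prop where
  dims : pvDims grid vis
  hs : s ∈ lV
  nodup : lV.Nodup
  mem : ∀ p ∈ lV, pvInb grid p ∧ pvOne grid p ∧ pvReach grid (pvBlockedA vis0) s p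
  visEq : ∀ p, pvInb grid p →
    pvVisAt vis p.1 p.2 = if p ∈ lV then 1 else pvVisAt vis0 p.1 p.2
  qsub : ∀ p ∈ q, p ∈ lV
  frontier : ∀ p ∈ lV, p ∈ exempt ∨ p ∈ q ∨
    ∀ w, pvAdj p w → pvOkC grid (pvBlockedA vis0) w → w ∈ lV
  shapeEq : shape = shape0 ++ lV.map (pvRel s)

-- the inner `for i in range(4)` body of pvBfsLoop, named so lemmas can speak about it
def pvStepFnA (grid : List (List String)) (base_row base_col r c : Int)
    (st : List (List Int) × List (Int × Int) × List (Int × Int)) (i : Nat) :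
    List (List Int) × List (Int × Int) × List (Int × Int) :=
  let nrow := r + pvDelrow.getD i 0
  let ncol := c + pvDelcol.getD i 0
  if 0 ≤ nrow ∧ nrow < (grid.length : Int) ∧ 0 ≤ ncol ∧
      ncol < (((grid.headD []).length : Int)) ∧ pvCell grid nrow ncol = "1" ∧
      pvVisAt st.1 nrow ncol = 0 then
    (pvMark st.1 nrow ncol, st.2.1 ++ [(nrow, ncol)],
     st.2.2 ++ [(nrow - base_row, ncol - base_col)])
  else st

lemma pvBfsLoop_cons (grid : List (List String)) (br bc : Int) (fuel : Nat) (r c : Int)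
    (q : List (Int × Int)) (vis : List (List Int)) (shape : List (Int × Int)) :
    pvBfsLoop grid br bc (fuel + 1) ((r, c) :: q) vis shape =
      (let st := (List.range 4).foldl (pvStepFnA grid br bc r c) (vis, q, shape)
       pvBfsLoop grid br bc fuel st.2.1 st.1 st.2.2) := rfl

-- effect of one neighbour probe on the invariant
lemma pvStepA {grid : List (List String)} {s : Int × Int} {vis0 : List (List Int)}
    {shape0 : List (Int × Int)} {pr w : Int × Int} {q : List (Int × Int)}
    {vis : List (List Int)} {shape lV : List (Int × Int)}
    (hinv : pvInvA grid s vis0 shape0 [pr] q vis shape lV)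
    (hpr : pr ∈ lV) (hadj : pvAdj pr w) :
    ∃ news v' q' s',
      (if 0 ≤ w.1 ∧ w.1 < (grid.length : Int) ∧ 0 ≤ w.2 ∧
          w.2 < (((grid.headD []).length : Int)) ∧ pvCell grid w.1 w.2 = "1" ∧
          pvVisAt vis w.1 w.2 = 0 then
        ((pvMark vis w.1 w.2, q ++ [w], shape ++ [pvRel s w]) :
          List (List Int) × List (Int × Int) × List (Int × Int))
      else (vis, q, shape)) = (v', q', s') ∧
      pvInvA grid s vis0 shape0 [pr] q' v' s' (lV ++ news) ∧
      q' = q ++ news ∧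
      (pvOkC grid (pvBlockedA vis0) w → w ∈ lV ++ news) := by
  by_cases hC : 0 ≤ w.1 ∧ w.1 < (grid.length : Int) ∧ 0 ≤ w.2 ∧
      w.2 < (((grid.headD []).length : Int)) ∧ pvCell grid w.1 w.2 = "1" ∧
      pvVisAt vis w.1 w.2 = 0
  · obtain ⟨h1, h2, h3, h4, h5, h6⟩ := hC
    have hwinb : pvInb grid w := ⟨h1, h2, h3, h4⟩
    have hnotin : w ∉ lV ∧ pvVisAt vis0 w.1 w.2 = 0 := by
      have := hinv.visEq w hwinb
      by_cases hw : w ∈ lV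
      · rw [if_pos hw] at this; omega
      · rw [if_neg hw] at this; exact ⟨hw, by omega⟩
    have hreach : pvReach grid (pvBlockedA vis0) s w :=
      pvReach.step (hinv.mem pr hpr).2.2 hadj
        ⟨hwinb, h5, fun hb => hb hnotin.2⟩
    have hC' : 0 ≤ w.1 ∧ w.1 < (grid.length : Int) ∧ 0 ≤ w.2 ∧
        w.2 < (((grid.headD []).length : Int)) ∧ pvCell grid w.1 w.2 = "1" ∧
        pvVisAt vis w.1 w.2 = 0 := ⟨h1, h2, h3, h4, h5, h6⟩
    refine ⟨[w], pvMark vis w.1 w.2, q ++ [w], shape ++ [pvRel s w],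
      by rw [if_pos hC'], ?_, rfl, fun _ => by simp⟩
    refine ⟨pvMark_dims hinv.dims h1 h2 h3, List.mem_append_left _ hinv.hs, ?_, ?_, ?_, ?_, ?_, ?_⟩
    · refine List.Nodup.append hinv.nodup (by simp) ?_
      intro a ha hb
      have : a = w := by simpa using hb
      subst this
      exact hnotin.1 ha
    · intro p hp
      rcases List.mem_append.1 hp with hp | hp
      · exact hinv.mem p hp
      · have : p = w := by simpa using hp
        subst this
        exact ⟨hwinb, h5, hreach⟩
    · intro p hpinb
      rw [pvVisAt_pvMark hinv.dims hwinb hpinb]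
      by_cases hpw : p = w
      · subst hpw
        simp
      · rw [if_neg hpw, hinv.visEq p hpinb]
        have : (p ∈ lV ++ [w]) ↔ p ∈ lV := by
          simp [hpw]
        rw [if_congr this rfl rfl]
    · intro p hp
      rcases List.mem_append.1 hp with hp | hp
      · exact List.mem_append_left _ (hinv.qsub p hp)
      · exact List.mem_append_right _ hp
    · intro p hp
      rcases List.mem_append.1 hp with hp | hp
      · rcases hinv.frontier p hp with h | h | h
        · exact Or.inl h
        · exact Or.inr (Or.inl (List.mem_append_left _ h))
        · exact Or.inr (Or.inr fun u hu hok => List.mem_append_left _ (h u hu hok))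
      · have : p = w := by simpa using hp
        subst this
        exact Or.inr (Or.inl (List.mem_append_right _ (by simp)))
    · rw [hinv.shapeEq]
      simp
  · refine ⟨[], vis, q, shape, by rw [if_neg hC], by simpa using hinv, by simp, ?_⟩
    intro hok
    obtain ⟨hwinb, hone, hnb⟩ := hok
    have h0 : pvVisAt vis0 w.1 w.2 = 0 := by
      by_contra hne
      exact hnb hne
    have hne : ¬ pvVisAt vis w.1 w.2 = 0 := by
      intro h6
      exact hC ⟨hwinb.1, hwinb.2.1, hwinb.2.2.1, hwinb.2.2.2, hone, h6⟩
    have := hinv.visEq w hwinb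
    by_cases hw : w ∈ lV
    · simpa using hw
    · rw [if_neg hw] at this; omega

-- the four probes of one BFS iteration, chained
lemma pvFoldA {grid : List (List String)} {s : Int × Int} {vis0 : List (List Int)}
    {shape0 : List (Int × Int)} {pr : Int × Int} {q : List (Int × Int)}
    {vis : List (List Int)} {shape lV : List (Int × Int)}
    (hinv : pvInvA grid s vis0 shape0 [pr] q vis shape lV) (hpr : pr ∈ lV) :
    ∃ news,
      pvInvA grid s vis0 shape0 [pr]
        ((List.range 4).foldl (pvStepFnA grid s.1 s.2 pr.1 pr.2) (vis, q, shape)).2.1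
        ((List.range 4).foldl (pvStepFnA grid s.1 s.2 pr.1 pr.2) (vis, q, shape)).1
        ((List.range 4).foldl (pvStepFnA grid s.1 s.2 pr.1 pr.2) (vis, q, shape)).2.2
        (lV ++ news) ∧
      ((List.range 4).foldl (pvStepFnA grid s.1 s.2 pr.1 pr.2) (vis, q, shape)).2.1 =
        q ++ news ∧
      (∀ w, pvAdj pr w → pvOkC grid (pvBlockedA vis0) w → w ∈ lV ++ news) := by
  have hrange : (List.range 4) = [0, 1, 2, 3] := rfl
  rw [hrange]
  simp only [List.foldl_cons, List.foldl_nil]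
  have hadj0 : pvAdj pr (pr.1 + -1, pr.2 + 0) := by
    unfold pvAdj; left; exact Prod.ext_iff.2 ⟨by omega, by omega⟩
  have hadj1 : pvAdj pr (pr.1 + 0, pr.2 + 1) := by
    unfold pvAdj; right; right; left; exact Prod.ext_iff.2 ⟨by omega, by omega⟩
  have hadj2 : pvAdj pr (pr.1 + 1, pr.2 + 0) := by
    unfold pvAdj; right; left; exact Prod.ext_iff.2 ⟨by omega, by omega⟩
  have hadj3 : pvAdj pr (pr.1 + 0, pr.2 + -1) := by
    unfold pvAdj; right; right; right; exact Prod.ext_iff.2 ⟨by omega, by omega⟩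
  obtain ⟨n0, v1, q1, s1, he0, hinv1, hq1, hres0⟩ := pvStepA hinv hpr hadj0
  have he0' : pvStepFnA grid s.1 s.2 pr.1 pr.2 (vis, q, shape) 0 = (v1, q1, s1) := he0
  rw [he0']
  obtain ⟨n1, v2, q2, s2, he1, hinv2, hq2, hres1⟩ :=
    pvStepA hinv1 (List.mem_append_left _ hpr) hadj1
  have he1' : pvStepFnA grid s.1 s.2 pr.1 pr.2 (v1, q1, s1) 1 = (v2, q2, s2) := he1
  rw [he1']
  obtain ⟨n2, v3, q3, s3, he2, hinv3, hq3, hres2⟩ :=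
    pvStepA hinv2 (List.mem_append_left _ (List.mem_append_left _ hpr)) hadj2
  have he2' : pvStepFnA grid s.1 s.2 pr.1 pr.2 (v2, q2, s2) 2 = (v3, q3, s3) := he2
  rw [he2']
  obtain ⟨n3, v4, q4, s4, he3, hinv4, hq4, hres3⟩ :=
    pvStepA hinv3
      (List.mem_append_left _ (List.mem_append_left _ (List.mem_append_left _ hpr))) hadj3
  have he3' : pvStepFnA grid s.1 s.2 pr.1 pr.2 (v3, q3, s3) 3 = (v4, q4, s4) := he3
  rw [he3']
  refine ⟨n0 ++ n1 ++ n2 ++ n3, ?_, ?_, ?_⟩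
  · have : lV ++ (n0 ++ n1 ++ n2 ++ n3) = lV ++ n0 ++ n1 ++ n2 ++ n3 := by simp
    rw [this]
    exact hinv4
  · rw [hq4, hq3, hq2, hq1]
    simp
  · intro w hadj hok
    have hbig : lV ++ (n0 ++ n1 ++ n2 ++ n3) = lV ++ n0 ++ n1 ++ n2 ++ n3 := by simp
    rw [hbig]
    rcases hadj with h | h | h | h
    · have hw : w = (pr.1 + -1, pr.2 + 0) := by
        rw [h]; exact Prod.ext_iff.2 ⟨by omega, by omega⟩
      subst hw
      exact List.mem_append_left _ (List.mem_append_left _ (List.mem_append_left _ (hres0 hok)))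
    · have hw : w = (pr.1 + 1, pr.2 + 0) := by
        rw [h]; exact Prod.ext_iff.2 ⟨by omega, by omega⟩
      subst hw
      exact List.mem_append_left _ (hres2 hok)
    · have hw : w = (pr.1 + 0, pr.2 + 1) := by
        rw [h]; exact Prod.ext_iff.2 ⟨by omega, by omega⟩
      subst hw
      exact List.mem_append_left _ (List.mem_append_left _ (hres1 hok))
    · have hw : w = (pr.1 + 0, pr.2 + -1) := by
        rw [h]; exact Prod.ext_iff.2 ⟨by omega, by omega⟩
      subst hw
      exact hres3 hok

lemma pvInvA_final {grid : List (List String)} {s : Int × Int} {vis0 : List (List Int)}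
    {shape0 : List (Int × Int)} {vis : List (List Int)} {shape lV : List (Int × Int)}
    (hinv : pvInvA grid s vis0 shape0 [] [] vis shape lV) :
    ∀ p, p ∈ lV ↔ pvReach grid (pvBlockedA vis0) s p := by
  intro p
  constructor
  · exact fun hp => (hinv.mem p hp).2.2
  · intro hr
    induction hr with
    | refl => exact hinv.hs
    | step hp hadj hok ih =>
      rcases hinv.frontier _ ih with h | h | h
      · simp at h
      · simp at h
      · exact h _ hadj hok

-- the BFS worklist loop computes exactly the reachable set
lemma pvBfsLoop_spec (grid : List (List String)) (s : Int × Int) (vis0 : List (List Int))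
    (shape0 : List (Int × Int)) :
    ∀ (fuel : Nat) (q : List (Int × Int)) (vis : List (List Int)) (shape lV : List (Int × Int)),
      pvInvA grid s vis0 shape0 [] q vis shape lV →
      q.length + (grid.length * (grid.headD []).length - lV.length) ≤ fuel →
      ∃ lVf : List (Int × Int), lVf.Nodup ∧
        (∀ p, p ∈ lVf ↔ pvReach grid (pvBlockedA vis0) s p) ∧
        (∀ p ∈ lVf, pvInb grid p) ∧
        (pvBfsLoop grid s.1 s.2 fuel q vis shape).2 = shape0 ++ lVf.map (pvRel s) ∧
        pvDims grid (pvBfsLoop grid s.1 s.2 fuel q vis shape).1 ∧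
        (∀ p, pvInb grid p → pvVisAt (pvBfsLoop grid s.1 s.2 fuel q vis shape).1 p.1 p.2
          = if p ∈ lVf then 1 else pvVisAt vis0 p.1 p.2) := by
  intro fuel
  induction fuel with
  | zero =>
    intro q vis shape lV hinv hfuel
    have hq : q = [] := List.length_eq_zero_iff.1 (by omega)
    subst hq
    exact ⟨lV, hinv.nodup, pvInvA_final hinv, fun p hp => (hinv.mem p hp).1,
      hinv.shapeEq, hinv.dims, hinv.visEq⟩
  | succ fuel ih =>
    intro q vis shape lV hinv hfuel
    match q with
    | [] =>
      exact ⟨lV, hinv.nodup, pvInvA_final hinv, fun p hp => (hinv.mem p hp).1,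
        hinv.shapeEq, hinv.dims, hinv.visEq⟩
    | (r, c) :: rest =>
      have hpr : (r, c) ∈ lV := hinv.qsub _ (by simp)
      have hinv' : pvInvA grid s vis0 shape0 [(r, c)] rest vis shape lV :=
        { dims := hinv.dims, hs := hinv.hs, nodup := hinv.nodup, mem := hinv.mem,
          visEq := hinv.visEq,
          qsub := fun p hp => hinv.qsub p (List.mem_cons_of_mem _ hp),
          frontier := by
            intro p hp
            rcases hinv.frontier p hp with h | h | h
            · simp at h
            · rcases List.mem_cons.1 h with h | h
              · exact Or.inl (by simp [h])
              · exact Or.inr (Or.inl h)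
            · exact Or.inr (Or.inr h)
          shapeEq := hinv.shapeEq }
      obtain ⟨news, hinvF, hqF, hcov⟩ := pvFoldA hinv' hpr
      have hinv'' : pvInvA grid s vis0 shape0 []
          ((List.range 4).foldl (pvStepFnA grid s.1 s.2 r c) (vis, rest, shape)).2.1
          ((List.range 4).foldl (pvStepFnA grid s.1 s.2 r c) (vis, rest, shape)).1
          ((List.range 4).foldl (pvStepFnA grid s.1 s.2 r c) (vis, rest, shape)).2.2
          (lV ++ news) :=
        { dims := hinvF.dims, hs := hinvF.hs, nodup := hinvF.nodup, mem := hinvF.mem,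
          visEq := hinvF.visEq, qsub := hinvF.qsub,
          frontier := by
            intro p hp
            rcases hinvF.frontier p hp with h | h | h
            · have hpc : p = (r, c) := by simpa using h
              subst hpc
              exact Or.inr (Or.inr fun w hw hok => hcov w hw hok)
            · exact Or.inr (Or.inl h)
            · exact Or.inr (Or.inr h)
          shapeEq := hinvF.shapeEq }
      have hlen : (lV ++ news).length ≤ grid.length * (grid.headD []).length :=
        pvLen_le_box hinvF.nodup (fun p hp => (hinvF.mem p hp).1)
      have hqlen :
          ((List.range 4).foldl (pvStepFnA grid s.1 s.2 r c) (vis, rest, shape)).2.1.length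
            = rest.length + news.length := by
        have : ((List.range 4).foldl (pvStepFnA grid s.1 s.2 r c)
            (vis, rest, shape)).2.1 = rest ++ news := hqF
        rw [this, List.length_append]
      have hfuel' :
          ((List.range 4).foldl (pvStepFnA grid s.1 s.2 r c) (vis, rest, shape)).2.1.length +
            (grid.length * (grid.headD []).length - (lV ++ news).length) ≤ fuel := by
        rw [hqlen]
        have h1 : (lV ++ news).length = lV.length + news.length := List.length_append ..
        have h2 : rest.length + 1 + (grid.length * (grid.headD []).length - lV.length)
            ≤ fuel + 1 := by simpa using hfuel
        omega
      rw [pvBfsLoop_cons]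
      exact ih _ _ _ (lV ++ news) hinv'' hfuel'

-- island-level spec of A's bfs
lemma pvBfs_spec {grid : List (List String)} {s : Int × Int} {vis0 : List (List Int)}
    (hdims : pvDims grid vis0) (hinb : pvInb grid s) (hone : pvOne grid s)
    (h0 : pvVisAt vis0 s.1 s.2 = 0) :
    ∃ lVf : List (Int × Int), lVf.Nodup ∧
      (∀ p, p ∈ lVf ↔ pvReach grid (pvBlockedA vis0) s p) ∧
      (∀ p ∈ lVf, pvInb grid p) ∧
      (pvBfs grid s.1 s.2 vis0 s.1 s.2 []).2 = lVf.map (pvRel s) ∧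
      pvDims grid (pvBfs grid s.1 s.2 vis0 s.1 s.2 []).1 ∧
      (∀ p, pvInb grid p → pvVisAt (pvBfs grid s.1 s.2 vis0 s.1 s.2 []).1 p.1 p.2
        = if p ∈ lVf then 1 else pvVisAt vis0 p.1 p.2) := by
  have hrel : pvRel s s = ((0 : Int), (0 : Int)) := by
    unfold pvRel; exact Prod.ext_iff.2 ⟨by omega, by omega⟩
  have hinv : pvInvA grid s vis0 [] [] [s] (pvMark vis0 s.1 s.2) [(0, 0)] [s] :=
    { dims := pvMark_dims hdims hinb.1 hinb.2.1 hinb.2.2.1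
      hs := by simp
      nodup := by simp
      mem := by
        intro p hp
        have : p = s := by simpa using hp
        subst this
        exact ⟨hinb, hone, pvReach.refl⟩
      visEq := by
        intro p hp
        rw [pvVisAt_pvMark hdims hinb hp]
        have : (p ∈ [s]) ↔ p = s := by simp
        rw [if_congr this.symm rfl rfl]
      qsub := by intro p hp; simpa using hp
      frontier := by
        intro p hp
        have : p = s := by simpa using hp
        subst this
        exact Or.inr (Or.inl (by simp))
      shapeEq := by simp [hrel] }
  have hfuel : ([s] : List (Int × Int)).length +
      (grid.length * (grid.headD []).length - ([s] : List (Int × Int)).length)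
      ≤ grid.length * (grid.headD []).length + 1 := by
    simp only [List.length_singleton]
    omega
  obtain ⟨lVf, h1, h2, h3, h4, h5, h6⟩ :=
    pvBfsLoop_spec grid s vis0 [] (grid.length * (grid.headD []).length + 1)
      [s] (pvMark vis0 s.1 s.2) [(0, 0)] [s] hinv hfuel
  exact ⟨lVf, h1, h2, h3, h4, h5, h6⟩

-- ---- B side: stack flood-fill invariant ----

def pvBlockedB (seen0 : List (Int × Int)) (p : Int × Int) : Prop := p ∈ seen0

structure pvInvB (grid : List (List String)) (s : Int × Int) (seen0 : List (Int × Int))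
    (stack seen shape lV : List (Int × Int)) : Prop where
  seenEq : seen = seen0 ++ lV
  nodup : (seen0 ++ lV).Nodup
  mem : ∀ p ∈ lV, pvInb grid p ∧ pvOne grid p ∧ pvReach grid (pvBlockedB seen0) s p
  hs : s ∈ lV ∨ s ∈ stack
  stackMem : ∀ w ∈ stack, w = s ∨ ∃ p ∈ lV, pvAdj p w
  frontier : ∀ p ∈ lV, ∀ w, pvAdj p w → pvOkC grid (pvBlockedB seen0) w →
    w ∈ lV ∨ w ∈ stack
  shapeEq : shape = lV.map (pvRel s)

lemma pvDfsLoop_cons (grid : List (List String)) (bi bj : Int) (fuel : Nat)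
    (p : Int × Int) (rest : List (Int × Int)) (seen shape : PySem.Set (Int × Int)) :
    pvDfsLoop grid bi bj (fuel + 1) (p :: rest) seen shape =
      (let rc := (p :: rest).getLast (by simp)
       let stack' := (p :: rest).dropLast
       if (¬ (0 ≤ rc.1 ∧ rc.1 < (grid.length : Int) ∧ 0 ≤ rc.2 ∧
            rc.2 < ((grid.headD []).length : Int))) ∨ pvCell grid rc.1 rc.2 ≠ "1" ∨
            PySem.Set.contains seen (rc.1, rc.2) = true then
         pvDfsLoop grid bi bj fuel stack' seen shape
       else
         pvDfsLoop grid bi bj fuel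
           (stack' ++ [(rc.1 - 1, rc.2), (rc.1 + 1, rc.2), (rc.1, rc.2 + 1), (rc.1, rc.2 - 1)])
           (PySem.Set.add seen (rc.1, rc.2)) (PySem.Set.add shape (rc.1 - bi, rc.2 - bj))) :=
  rfl

lemma pvContains_iff {l : List (Int × Int)} {x : Int × Int} :
    PySem.Set.contains l x = true ↔ x ∈ l := List.contains_iff_mem

-- the stack loop of B computes exactly the reachable set
lemma pvDfsLoop_spec (grid : List (List String)) (s : Int × Int) (seen0 : List (Int × Int))
    (hinb : pvInb grid s) (hone : pvOne grid s) (hns : s ∉ seen0) :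
    ∀ (fuel : Nat) (stack seen shape lV : List (Int × Int)),
      pvInvB grid s seen0 stack seen shape lV →
      stack.length + 5 * (grid.length * (grid.headD []).length - lV.length) ≤ fuel →
      ∃ lVf : List (Int × Int), lVf.Nodup ∧
        (∀ p, p ∈ lVf ↔ pvReach grid (pvBlockedB seen0) s p) ∧
        (∀ p ∈ lVf, pvInb grid p) ∧
        (pvDfsLoop grid s.1 s.2 fuel stack seen shape).1 = seen0 ++ lVf ∧
        (seen0 ++ lVf).Nodup ∧
        (pvDfsLoop grid s.1 s.2 fuel stack seen shape).2 = lVf.map (pvRel s) := by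
  have final : ∀ (seen shape lV : List (Int × Int)),
      pvInvB grid s seen0 [] seen shape lV →
      ∃ lVf : List (Int × Int), lVf.Nodup ∧
        (∀ p, p ∈ lVf ↔ pvReach grid (pvBlockedB seen0) s p) ∧
        (∀ p ∈ lVf, pvInb grid p) ∧
        seen = seen0 ++ lVf ∧ (seen0 ++ lVf).Nodup ∧ shape = lVf.map (pvRel s) := by
    intro seen shape lV hinv
    have hsl : s ∈ lV := by
      rcases hinv.hs with h | h
      · exact h
      · simp at h
    refine ⟨lV, (List.nodup_append.1 hinv.nodup).2.1, ?_, fun p hp => (hinv.mem p hp).1,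
      hinv.seenEq, hinv.nodup, hinv.shapeEq⟩
    intro p
    constructor
    · exact fun hp => (hinv.mem p hp).2.2
    · intro hr
      induction hr with
      | refl => exact hsl
      | step hp hadj hok ih =>
        rcases hinv.frontier _ ih _ hadj hok with h | h
        · exact h
        · simp at h
  intro fuel
  induction fuel with
  | zero =>
    intro stack seen shape lV hinv hfuel
    have hstack : stack = [] := List.length_eq_zero_iff.1 (by omega)
    subst hstack
    exact final seen shape lV hinv
  | succ fuel ih =>
    intro stack seen shape lV hinv hfuel
    match stack with
    | [] => exact final seen shape lV hinv
    | p :: rest =>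
      rw [pvDfsLoop_cons]
      set w : Int × Int := (p :: rest).getLast (by simp) with hw
      set init : List (Int × Int) := (p :: rest).dropLast with hinit
      have hsplit : init ++ [w] = p :: rest := List.dropLast_append_getLast (by simp)
      have hmemstack : ∀ x : Int × Int, x ∈ (p :: rest) ↔ x ∈ init ∨ x = w := by
        intro x
        rw [← hsplit]
        simp
      have hwin : w ∈ (p :: rest) := (hmemstack w).2 (Or.inr rfl)
      have hlenstack : (p :: rest).length = init.length + 1 := by
        rw [← hsplit]; simp
      by_cases hg : (¬ (0 ≤ w.1 ∧ w.1 < (grid.length : Int) ∧ 0 ≤ w.2 ∧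
          w.2 < ((grid.headD []).length : Int))) ∨ pvCell grid w.1 w.2 ≠ "1" ∨
          PySem.Set.contains seen (w.1, w.2) = true
      · rw [if_pos hg]
        have hinv' : pvInvB grid s seen0 init seen shape lV :=
          { seenEq := hinv.seenEq, nodup := hinv.nodup, mem := hinv.mem,
            hs := by
              rcases hinv.hs with h | h
              · exact Or.inl h
              · rcases (hmemstack s).1 h with h | h
                · exact Or.inr h
                · -- the popped cell is s itself: the guard must have fired on seen
                  subst h
                  rcases hg with hg | hg | hg
                  · exact absurd hinb hg
                  · exact absurd hone hg
                  · have hws : w ∈ seen := by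
                      have := pvContains_iff.1 hg
                      simpa using this
                    rw [hinv.seenEq] at hws
                    rcases List.mem_append.1 hws with h | h
                    · exact absurd h hns
                    · exact Or.inl h
            stackMem := fun x hx => hinv.stackMem x ((hmemstack x).2 (Or.inl hx)),
            frontier := by
              intro a ha u hu hok
              rcases hinv.frontier a ha u hu hok with h | h
              · exact Or.inl h
              · rcases (hmemstack u).1 h with h | h
                · exact Or.inr h
                · subst h
                  rcases hg with hg | hg | hg
                  · exact absurd hok.1 hg
                  · exact absurd hok.2.1 hg
                  · have hws : w ∈ seen := by
                      have := pvContains_iff.1 hg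
                      simpa using this
                    rw [hinv.seenEq] at hws
                    rcases List.mem_append.1 hws with h | h
                    · exact absurd h hok.2.2
                    · exact Or.inl h
            shapeEq := hinv.shapeEq }
        refine ih init seen shape lV hinv' ?_
        omega
      · rw [if_neg hg]
        push Not at hg
        obtain ⟨hwinb', hwone, hwsc⟩ := hg
        have hwinb : pvInb grid w := hwinb'
        have hwns : w ∉ seen := fun hmem => hwsc (pvContains_iff.2 (by simpa using hmem))
        have hwns0 : w ∉ seen0 := fun hmem =>
          hwns (by rw [hinv.seenEq]; exact List.mem_append_left _ hmem)
        have hwnlV : w ∉ lV := fun hmem =>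
          hwns (by rw [hinv.seenEq]; exact List.mem_append_right _ hmem)
        have hreach : pvReach grid (pvBlockedB seen0) s w := by
          rcases hinv.stackMem w hwin with h | ⟨a, ha, hadj⟩
          · rw [h]; exact pvReach.refl
          · exact pvReach.step (hinv.mem a ha).2.2 hadj ⟨hwinb, hwone, hwns0⟩
        have hseenadd : PySem.Set.add seen (w.1, w.2) = seen ++ [w] := by
          unfold PySem.Set.add
          rw [if_neg hwsc]
        have hshapeadd : PySem.Set.add shape (w.1 - s.1, w.2 - s.2) = shape ++ [pvRel s w] := by
          have hc : ¬ PySem.Set.contains shape (w.1 - s.1, w.2 - s.2) = true := by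
            intro hc
            have hmem : (pvRel s w) ∈ shape := by
              have := pvContains_iff.1 hc
              simpa [pvRel] using this
            rw [hinv.shapeEq] at hmem
            obtain ⟨a, ha, he⟩ := List.mem_map.1 hmem
            exact hwnlV (pvRel_inj s he ▸ ha)
          unfold PySem.Set.add
          rw [if_neg hc]
          rfl
        rw [hseenadd, hshapeadd]
        have hadjA : pvAdj w (w.1 - 1, w.2) := Or.inl rfl
        have hadjB : pvAdj w (w.1 + 1, w.2) := Or.inr (Or.inl rfl)
        have hadjC : pvAdj w (w.1, w.2 + 1) := Or.inr (Or.inr (Or.inl rfl))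
        have hadjD : pvAdj w (w.1, w.2 - 1) := Or.inr (Or.inr (Or.inr rfl))
        have hinv' : pvInvB grid s seen0
            (init ++ [(w.1 - 1, w.2), (w.1 + 1, w.2), (w.1, w.2 + 1), (w.1, w.2 - 1)])
            (seen ++ [w]) (shape ++ [pvRel s w]) (lV ++ [w]) :=
          { seenEq := by rw [hinv.seenEq]; simp
            nodup := by
              have he : seen0 ++ (lV ++ [w]) = (seen0 ++ lV) ++ [w] := by simp
              rw [he]
              refine List.Nodup.append hinv.nodup (by simp) ?_
              intro a ha hb
              have : a = w := by simpa using hb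
              subst this
              rcases List.mem_append.1 ha with h | h
              · exact hwns0 h
              · exact hwnlV h
            mem := by
              intro x hx
              rcases List.mem_append.1 hx with h | h
              · exact hinv.mem x h
              · have : x = w := by simpa using h
                subst this
                exact ⟨hwinb, hwone, hreach⟩
            hs := by
              rcases hinv.hs with h | h
              · exact Or.inl (List.mem_append_left _ h)
              · rcases (hmemstack s).1 h with h | h
                · exact Or.inr (List.mem_append_left _ h)
                · exact Or.inl (List.mem_append_right _ (by simp [h]))
            stackMem := by
              intro x hx
              rcases List.mem_append.1 hx with h | h
              · rcases hinv.stackMem x ((hmemstack x).2 (Or.inl h)) with h' | ⟨a, ha, hadj⟩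
                · exact Or.inl h'
                · exact Or.inr ⟨a, List.mem_append_left _ ha, hadj⟩
              · have hwmem : w ∈ lV ++ [w] := List.mem_append_right _ (by simp)
                have h4 : x = (w.1 - 1, w.2) ∨ x = (w.1 + 1, w.2) ∨ x = (w.1, w.2 + 1) ∨
                    x = (w.1, w.2 - 1) := by simpa using h
                rcases h4 with h' | h' | h' | h'
                · exact Or.inr ⟨w, hwmem, h' ▸ hadjA⟩
                · exact Or.inr ⟨w, hwmem, h' ▸ hadjB⟩
                · exact Or.inr ⟨w, hwmem, h' ▸ hadjC⟩
                · exact Or.inr ⟨w, hwmem, h' ▸ hadjD⟩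
            frontier := by
              intro a ha u hu hok
              rcases List.mem_append.1 ha with h | h
              · rcases hinv.frontier a h u hu hok with h' | h'
                · exact Or.inl (List.mem_append_left _ h')
                · rcases (hmemstack u).1 h' with h'' | h''
                  · exact Or.inr (List.mem_append_left _ h'')
                  · exact Or.inl (List.mem_append_right _ (by simp [h'']))
              · have : a = w := by simpa using h
                subst this
                rcases hu with h' | h' | h' | h'
                · exact Or.inr (List.mem_append_right _ (by simp [h']))
                · exact Or.inr (List.mem_append_right _ (by simp [h']))
                · exact Or.inr (List.mem_append_right _ (by simp [h']))
                · exact Or.inr (List.mem_append_right _ (by simp [h']))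
            shapeEq := by rw [hinv.shapeEq]; simp }
        have hnodw : (lV ++ [w]).Nodup :=
          List.Nodup.of_append_right (l₁ := seen0) (by
            have he : seen0 ++ (lV ++ [w]) = (seen0 ++ lV) ++ [w] := by simp
            exact hinv'.nodup)
        have hNM : (lV ++ [w]).length ≤ grid.length * (grid.headD []).length :=
          pvLen_le_box hnodw (fun x hx => (hinv'.mem x hx).1)
        refine ih _ _ _ (lV ++ [w]) hinv' ?_
        have hlen4 : (init ++ [(w.1 - 1, w.2), (w.1 + 1, w.2), (w.1, w.2 + 1),
            (w.1, w.2 - 1)]).length = init.length + 4 := by simp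
        have hlw : (lV ++ [w]).length = lV.length + 1 := by simp
        omega

-- island-level spec of B's stack flood fill
lemma pvDfs_spec {grid : List (List String)} {s : Int × Int} {seen0 : List (Int × Int)}
    (hnd : seen0.Nodup) (hinb : pvInb grid s) (hone : pvOne grid s) (hns : s ∉ seen0) :
    ∃ lVf : List (Int × Int), lVf.Nodup ∧
      (∀ p, p ∈ lVf ↔ pvReach grid (pvBlockedB seen0) s p) ∧
      (∀ p ∈ lVf, pvInb grid p) ∧
      (pvDfsLoop grid s.1 s.2 (5 * (grid.length * (grid.headD []).length) + 1)
        [s] seen0 PySem.Set.empty).1 = seen0 ++ lVf ∧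
      (seen0 ++ lVf).Nodup ∧
      (pvDfsLoop grid s.1 s.2 (5 * (grid.length * (grid.headD []).length) + 1)
        [s] seen0 PySem.Set.empty).2 = lVf.map (pvRel s) := by
  have hinv : pvInvB grid s seen0 [s] seen0 PySem.Set.empty [] :=
    { seenEq := by simp
      nodup := by simpa using hnd
      mem := by intro p hp; simp at hp
      hs := Or.inr (by simp)
      stackMem := by
        intro x hx
        have : x = s := by simpa using hx
        exact Or.inl this
      frontier := by intro p hp; simp at hp
      shapeEq := rfl }
  have hfuel : ([s] : List (Int × Int)).length +
      5 * (grid.length * (grid.headD []).length - ([] : List (Int × Int)).length)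
      ≤ 5 * (grid.length * (grid.headD []).length) + 1 := by
    simp
    omega
  exact pvDfsLoop_spec grid s seen0 hinb hone hns _ [s] seen0 PySem.Set.empty [] hinv hfuel

-- ---- relating the two outer scans ----

def pvRelSt (grid : List (List String))
    (stA : List (List Int) × PySem.Set (List (Int × Int)))
    (stB : PySem.Set (Int × Int) × PySem.Set (List (Int × Int))) : Prop :=
  pvDims grid stA.1 ∧ stB.1.Nodup ∧
  (∀ p : Int × Int, pvInb grid p → (pvVisAt stA.1 p.1 p.2 = 0 ↔ p ∉ stB.1)) ∧
  stA.2 = stB.2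

lemma pvFoldRel {α β γ : Type} (R : α → β → Prop) (f : α → γ → α) (g : β → γ → β) :
    ∀ (l : List γ), (∀ x ∈ l, ∀ a b, R a b → R (f a x) (g b x)) →
    ∀ a b, R a b → R (l.foldl f a) (l.foldl g b) := by
  intro l
  induction l with
  | nil => intro _ a b h; exact h
  | cons x xs ih =>
    intro hstep a b h
    exact ih (fun y hy => hstep y (List.mem_cons_of_mem _ hy)) (f a x) (g b x)
      (hstep x (by simp) a b h)

-- processing one scanned cell preserves the relation
lemma pvCellStep {grid : List (List String)} {i j : Int} (hinb : pvInb grid (i, j))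
    {stA : List (List Int) × PySem.Set (List (Int × Int))}
    {stB : PySem.Set (Int × Int) × PySem.Set (List (Int × Int))}
    (hrel : pvRelSt grid stA stB) :
    pvRelSt grid
      (if pvCell grid i j = "1" ∧ pvVisAt stA.1 i j = 0 then
        (let r := pvBfs grid i j stA.1 i j []
         (r.1, PySem.Set.add stA.2 (pvFrozen r.2)))
       else stA)
      (if pvCell grid i j = "1" ∧ ¬ PySem.Set.contains stB.1 (i, j) = true then
        (let r := pvDfsLoop grid i j
            (5 * (grid.length * (grid.headD []).length) + 1) [(i, j)] stB.1 PySem.Set.empty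
         (r.1, PySem.Set.add stB.2 (pvFrozen r.2)))
       else stB) := by
  obtain ⟨hdims, hnd, hiff, hsh⟩ := hrel
  have hguard : (pvCell grid i j = "1" ∧ pvVisAt stA.1 i j = 0) ↔
      (pvCell grid i j = "1" ∧ ¬ PySem.Set.contains stB.1 (i, j) = true) := by
    constructor
    · rintro ⟨h1, h2⟩
      refine ⟨h1, fun hc => ?_⟩
      exact ((hiff (i, j) hinb).1 h2) (pvContains_iff.1 hc)
    · rintro ⟨h1, h2⟩
      refine ⟨h1, (hiff (i, j) hinb).2 fun hm => h2 (pvContains_iff.2 hm)⟩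
  by_cases hA : pvCell grid i j = "1" ∧ pvVisAt stA.1 i j = 0
  · have hB := hguard.1 hA
    rw [if_pos hA, if_pos hB]
    have hone : pvOne grid ((i, j) : Int × Int) := hA.1
    have hns : ((i, j) : Int × Int) ∉ stB.1 := fun hm => hB.2 (pvContains_iff.2 hm)
    obtain ⟨lA, hAnd, hAmem, hAinb, hAshape, hAdims, hAvis⟩ :=
      pvBfs_spec (s := (i, j)) hdims hinb hone hA.2
    obtain ⟨lB, hBnd, hBmem, hBinb, hBseen, hBseennd, hBshape⟩ :=
      pvDfs_spec (s := (i, j)) hnd hinb hone hns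
    have hcongr : ∀ p, pvInb grid p → pvOne grid p →
        (pvBlockedA stA.1 p ↔ pvBlockedB stB.1 p) := by
      intro p hp _
      unfold pvBlockedA pvBlockedB
      have h := hiff p hp
      constructor
      · intro hne
        by_contra hm
        exact hne (h.2 hm)
      · intro hm hz
        exact (h.1 hz) hm
    have hmemiff : ∀ p, p ∈ lA ↔ p ∈ lB := by
      intro p
      rw [hAmem p, hBmem p]
      constructor
      · exact pvReach_congr hcongr p
      · exact pvReach_congr (fun p hp ho => (hcongr p hp ho).symm) p
    refine ⟨by exact hAdims, ?_, ?_, ?_⟩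
    · show ((pvDfsLoop grid (i, j).1 (i, j).2
          (5 * (grid.length * (grid.headD []).length) + 1)
          [(i, j)] stB.1 PySem.Set.empty).1).Nodup
      rw [hBseen]
      exact hBseennd
    · intro p hp
      show pvVisAt (pvBfs grid (i, j).1 (i, j).2 stA.1 (i, j).1 (i, j).2 []).1 p.1 p.2 = 0 ↔
        p ∉ (pvDfsLoop grid (i, j).1 (i, j).2
          (5 * (grid.length * (grid.headD []).length) + 1)
          [(i, j)] stB.1 PySem.Set.empty).1
      rw [hAvis p hp, hBseen]
      by_cases hpl : p ∈ lA
      · rw [if_pos hpl]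
        have : p ∈ stB.1 ++ lB := List.mem_append_right _ ((hmemiff p).1 hpl)
        constructor
        · intro h; omega
        · intro h; exact absurd this h
      · rw [if_neg hpl]
        have hplB : p ∉ lB := fun h => hpl ((hmemiff p).2 h)
        rw [hiff p hp]
        constructor
        · intro h hm
          rcases List.mem_append.1 hm with hm | hm
          · exact h hm
          · exact hplB hm
        · intro h hm
          exact h (List.mem_append_left _ hm)
    · show PySem.Set.add stA.2 (pvFrozen (pvBfs grid (i, j).1 (i, j).2 stA.1 (i, j).1 (i, j).2 []).2) =
        PySem.Set.add stB.2 (pvFrozen (pvDfsLoop grid (i, j).1 (i, j).2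
          (5 * (grid.length * (grid.headD []).length) + 1) [(i, j)] stB.1 PySem.Set.empty).2)
      rw [hsh, hAshape, hBshape]
      have hinj : Function.Injective (pvRel ((i, j) : Int × Int)) :=
        fun a b h => pvRel_inj _ h
      have hfroz : pvFrozen (lA.map (pvRel ((i, j) : Int × Int))) =
          pvFrozen (lB.map (pvRel ((i, j) : Int × Int))) := by
        refine pvFrozen_eq (hAnd.map hinj) (hBnd.map hinj) ?_
        intro x
        simp only [List.mem_map]
        constructor
        · rintro ⟨a, ha, rfl⟩
          exact ⟨a, (hmemiff a).1 ha, rfl⟩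
        · rintro ⟨a, ha, rfl⟩
          exact ⟨a, (hmemiff a).2 ha, rfl⟩
      rw [hfroz]
  · have hB : ¬ (pvCell grid i j = "1" ∧ ¬ PySem.Set.contains stB.1 (i, j) = true) :=
      fun h => hA (hguard.2 h)
    rw [if_neg hA, if_neg hB]
    exact ⟨hdims, hnd, hiff, hsh⟩

-- ===== VERDICT (by name: the statement is the Claim_ definition above) =====
theorem num_unique_islands_spec : Claim_equal_num_unique_islands := by
  intro grid _ _
  show num_unique_islands grid = num_unique_islands_alt grid
  have hinit : pvRelSt grid
      (List.replicate grid.length (List.replicate (grid.headD []).length 0), PySem.Set.empty)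
      (PySem.Set.empty, PySem.Set.empty) := by
    refine ⟨⟨by simp, ?_⟩, by simp, ?_, rfl⟩
    · intro row hrow
      have := List.eq_of_mem_replicate hrow
      rw [this]
      simp
    · intro p hp
      obtain ⟨h1, h2, h3, h4⟩ := hp
      show pvVisAt (List.replicate grid.length (List.replicate (grid.headD []).length 0)) p.1 p.2 = 0 ↔ _
      rw [pvVisAt_eq_getD h1 h3]
      have hr : p.1.toNat <
          (List.replicate grid.length (List.replicate (grid.headD []).length (0 : Int))).length := by
        rw [List.length_replicate]
        omega
      rw [List.getD_eq_getElem _ [] hr, List.getElem_replicate]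
      have hc : p.2.toNat < (List.replicate (grid.headD []).length (0 : Int)).length := by
        rw [List.length_replicate]
        omega
      rw [List.getD_eq_getElem _ 1 hc, List.getElem_replicate]
      simp
  have hrel := pvFoldRel (pvRelSt grid)
    (fun st i => (PySem.List.pyRange 0 ((grid.headD []).length : Int)).foldl
      (fun st j => if pvCell grid i j = "1" ∧ pvVisAt st.1 i j = 0 then
          (let r := pvBfs grid i j st.1 i j []
           (r.1, PySem.Set.add st.2 (pvFrozen r.2)))
        else st) st)
    (fun st i => (PySem.List.pyRange 0 ((grid.headD []).length : Int)).foldl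
      (fun st j => if pvCell grid i j = "1" ∧ ¬ PySem.Set.contains st.1 (i, j) = true then
          (let r := pvDfsLoop grid i j
              (5 * (grid.length * (grid.headD []).length) + 1) [(i, j)] st.1 PySem.Set.empty
           (r.1, PySem.Set.add st.2 (pvFrozen r.2)))
        else st) st)
    (PySem.List.pyRange 0 (grid.length : Int))
    (by
      intro x hx a b hab
      have hxb := PySem.List.mem_pyRange_one.1 hx
      refine pvFoldRel _ _ _ _ ?_ a b hab
      intro y hy a' b' hab'
      have hyb := PySem.List.mem_pyRange_one.1 hy
      exact pvCellStep ⟨hxb.1, hxb.2, hyb.1, hyb.2⟩ hab')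
    _ _ hinit
  show PySem.Set.len ((PySem.List.pyRange 0 (grid.length : Int)).foldl
      (fun st i => (PySem.List.pyRange 0 ((grid.headD []).length : Int)).foldl
        (fun st j => if pvCell grid i j = "1" ∧ pvVisAt st.1 i j = 0 then
            (let r := pvBfs grid i j st.1 i j []
             (r.1, PySem.Set.add st.2 (pvFrozen r.2)))
          else st) st)
      (List.replicate grid.length (List.replicate (grid.headD []).length 0),
        PySem.Set.empty)).2 =
    PySem.Set.len ((PySem.List.pyRange 0 (grid.length : Int)).foldl
      (fun st i => (PySem.List.pyRange 0 ((grid.headD []).length : Int)).foldl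
        (fun st j => if pvCell grid i j = "1" ∧ ¬ PySem.Set.contains st.1 (i, j) = true then
            (let r := pvDfsLoop grid i j
                (5 * (grid.length * (grid.headD []).length) + 1) [(i, j)] st.1 PySem.Set.empty
             (r.1, PySem.Set.add st.2 (pvFrozen r.2)))
          else st) st)
      (PySem.Set.empty, PySem.Set.empty)).2
  rw [hrel.2.2.2]
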